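-- pv_equiv track=rewrite | github.com/Henos78/Leetcode-challenges | Minimum Integer - GFG/minimum-integer.py | minimumInteger
-- ===== SOURCE A (Python) =====
-- from typing import List
--
-- def minimumInteger(N : int, A : List[int]) -> int:
--     # code here
--     if N == 1:
--         return A[0]
--
--     summ = sum(A)
--     res = []
--     for i in range(N):
--         if summ <= N*A[i]:
--             res.append(A[i])
--
--     return min(res)
-- ===== SOURCE B (Python) =====
-- def minimumInteger(N, A):
--     if N == 1:
--         return A[0]
--     s = sum(A)
--     for x in sorted(A[:N]):
--         if s <= N * x:
--             return x
--     raise ValueError("no scanned element is at least the mean")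
-- ===== Notes on version B (the rewrite author's own statement) =====
-- stated objective: alternative
-- what changed: B sorts the scanned prefix A[:N] once and returns the first element x of the ascending order with sum(A) <= N*x, replacing A's build-a-filtered-list-then-min pass.
import Mathlib
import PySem

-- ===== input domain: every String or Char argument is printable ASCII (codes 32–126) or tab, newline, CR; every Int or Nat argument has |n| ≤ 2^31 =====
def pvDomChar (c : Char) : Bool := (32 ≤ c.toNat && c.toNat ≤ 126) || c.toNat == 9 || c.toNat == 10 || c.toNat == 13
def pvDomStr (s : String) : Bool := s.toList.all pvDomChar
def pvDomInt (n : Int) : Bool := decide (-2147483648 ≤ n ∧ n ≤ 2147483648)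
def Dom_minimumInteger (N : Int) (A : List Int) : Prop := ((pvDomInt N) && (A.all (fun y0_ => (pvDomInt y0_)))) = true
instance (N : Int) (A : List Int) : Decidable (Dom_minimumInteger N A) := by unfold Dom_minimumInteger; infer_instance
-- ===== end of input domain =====

-- B replaces A's filtered-list-then-min pass by one sorted scan of the examined prefix A[:N],
-- returning the first element x with sum(A) <= N*x; equal return values wherever A returns.

-- ===== PORT A =====
def minimumInteger (N : Int) (A : List Int) : Int :=
  if N = 1 then
    (PySem.List.pyGet? A 0).getD 0          -- A[0]; in range under Pre_
  else
    let summ := A.sum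
    let res := (PySem.List.pyRange 0 N 1).foldl
      (fun r i => if summ ≤ N * PySem.List.pyGetD A i 0 then r ++ [PySem.List.pyGetD A i 0] else r) []
    (PySem.List.min? res (fun x => x)).getD 0   -- min(res); nonempty under Pre_

-- ===== PORT B =====
def minimumInteger_alt (N : Int) (A : List Int) : Int :=
  if N = 1 then
    (PySem.List.pyGet? A 0).getD 0          -- A[0]; in range under Pre_
  else
    let s := A.sum
    match (PySem.List.sorted (PySem.List.slice A none (some N)) (fun x => x) false).find?
        (fun x => decide (s ≤ N * x)) with
    | some x => x
    | none => 0                              -- raise ValueError; unreachable under Pre_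

-- ===== PRECONDITION & SPEC =====
-- Pre_ is exactly where A returns: 1 <= N <= len(A) (N > len(A) raises IndexError, N <= 0 raises
-- ValueError from min([])) and, unless N == 1, some scanned element A[i] (i < N) must reach the
-- mean, i.e. sum(A) <= N*A[i], or min(res) raises ValueError on the empty list.
def Pre_minimumInteger (N : Int) (A : List Int) : Prop :=
  1 ≤ N ∧ N ≤ (A.length : Int) ∧ (N = 1 ∨ ∃ x ∈ A.take N.toNat, A.sum ≤ N * x)
instance (N : Int) (A : List Int) : Decidable (Pre_minimumInteger N A) := by
  unfold Pre_minimumInteger; infer_instance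

def pvWitness_minimumInteger : Int × List Int := (3, [2, 7, 3])

def Spec_minimumInteger (N : Int) (A : List Int) (out : Int) : Prop := out = minimumInteger_alt N A
instance (N : Int) (A : List Int) (out : Int) : Decidable (Spec_minimumInteger N A out) := by
  unfold Spec_minimumInteger; infer_instance

-- ===== CLAIM (what is proved, stated in full; the proofs are below) =====
def Claim_equal_minimumInteger : Prop := ∀ (N : Int) (A : List Int), Dom_minimumInteger N A → Pre_minimumInteger N A → Spec_minimumInteger N A (minimumInteger N A)

-- ===== LEMMAS AND PROOFS =====

-- The first satisfier of p in the ascending order of l equals the minimum of l's satisfiers.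
theorem find_sorted_eq_min_filter (p : Int → Bool) (l : List Int) :
    (PySem.List.sorted l (fun x => x) false).find? p
      = PySem.List.min? (l.filter p) (fun x => x) := by
  cases hf : (PySem.List.sorted l (fun x => x) false).find? p with
  | none =>
      rcases hm : PySem.List.min? (l.filter p) (fun x => x) with _ | m
      · rfl
      · exfalso
        have hmem : m ∈ l.filter p := PySem.List.min?_mem hm
        have hmA : m ∈ l := List.mem_of_mem_filter hmem
        have hpm : p m = true := List.of_mem_filter hmem
        have hS : m ∈ PySem.List.sorted l (fun x => x) false :=
          (PySem.List.mem_sorted l (fun x => x) false m).2 hmA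
        have := List.find?_isSome.2 ⟨m, hS, hpm⟩
        rw [hf] at this; simp at this
  | some m =>
      have hpm : p m = true := List.find?_some hf
      have hmS : m ∈ PySem.List.sorted l (fun x => x) false := List.mem_of_find?_eq_some hf
      have hmA : m ∈ l := (PySem.List.mem_sorted l (fun x => x) false m).1 hmS
      have hmF : m ∈ l.filter p := List.mem_filter.2 ⟨hmA, hpm⟩
      rcases hm : PySem.List.min? (l.filter p) (fun x => x) with _ | m'
      · exfalso
        have : l.filter p = [] := (PySem.List.min?_eq_none_iff _ _).1 hm
        rw [this] at hmF; simp at hmF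
      · have hm'F : m' ∈ l.filter p := PySem.List.min?_mem hm
        have hle1 : m' ≤ m := PySem.List.min?_isMin hm m hmF
        have hm'A : m' ∈ l := List.mem_of_mem_filter hm'F
        have hpm' : p m' = true := List.of_mem_filter hm'F
        have hm'S : m' ∈ PySem.List.sorted l (fun x => x) false :=
          (PySem.List.mem_sorted l (fun x => x) false m').2 hm'A
        rcases List.find?_eq_some_iff_append.1 hf with ⟨_, l1, l2, hsplit, hbefore⟩
        have hpw : (PySem.List.sorted l (fun x => x) false).Pairwise
            (fun a b => (fun x => x) a ≤ (fun x => x) b) :=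
          PySem.List.sorted_pairwise l (fun x => x)
        rw [hsplit] at hm'S hpw
        have hle2 : m ≤ m' := by
          rcases List.mem_append.1 hm'S with h1 | h2
          · exact absurd hpm' (by simpa using hbefore m' h1)
          · rcases List.mem_cons.1 h2 with rfl | h3
            · exact le_refl _
            · have hmid := (List.pairwise_append.1 hpw).2.1
              exact (List.pairwise_cons.1 hmid).1 m' h3
        have : m = m' := le_antisymm hle2 hle1
        simp [this]

-- Indexing the examined prefix: A[i] and (A.take n)[i] agree for 0 ≤ i < n ≤ len A.
theorem pyGetD_take_eq (A : List Int) (n : Nat) (i : Int) (h0 : 0 ≤ i)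
    (hi : i < (n : Int)) (hn : n ≤ A.length) :
    PySem.List.pyGetD (A.take n) i 0 = PySem.List.pyGetD A i 0 := by
  obtain ⟨k, rfl⟩ : ∃ k : Nat, i = (k : Int) := ⟨i.toNat, by omega⟩
  have hk : k < n := by omega
  have hkA : k < A.length := by omega
  simp [List.getD, hk, hkA]

theorem minimumInteger_spec : Claim_equal_minimumInteger := by
  intro N A _ hpre
  obtain ⟨h1le, hlen, -⟩ := hpre
  unfold Spec_minimumInteger minimumInteger minimumInteger_alt
  by_cases h1 : N = 1
  · simp only [if_pos h1]
  · simp only [if_neg h1]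
    obtain ⟨n, rfl⟩ : ∃ n : Nat, N = (n : Int) := ⟨N.toNat, by omega⟩
    have hnlen : n ≤ A.length := by omega
    rw [PySem.List.slice_to_natCast]
    have hcong : (PySem.List.pyRange 0 (n : Int) 1).foldl
        (fun r i => if A.sum ≤ (n : Int) * PySem.List.pyGetD A i 0
                    then r ++ [PySem.List.pyGetD A i 0] else r) []
      = (PySem.List.pyRange 0 (n : Int) 1).foldl
        (fun r i => if A.sum ≤ (n : Int) * PySem.List.pyGetD (A.take n) i 0
                    then r ++ [PySem.List.pyGetD (A.take n) i 0] else r) [] := by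
      apply PySem.List.foldl_congr_mem
      intro r i hi
      have hmem := (PySem.List.mem_pyRange_one).1 hi
      rw [pyGetD_take_eq A n i hmem.1 hmem.2 hnlen]
    rw [hcong]
    have hN' : (n : Int) = ((A.take n).length : Int) := by
      simp [List.length_take]; omega
    rw [hN']
    rw [PySem.List.foldl_pyRange_zero_pyGetD' (A.take n) 0
        (fun r v => if A.sum ≤ ((A.take n).length : Int) * v then r ++ [v] else r) []]
    rw [PySem.List.foldl_append_ite_eq_filter]
    simp only [List.nil_append]
    rw [← find_sorted_eq_min_filter]
    generalize (PySem.List.sorted (A.take n) (fun x => x) false).find?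
        (fun x => decide (A.sum ≤ ((A.take n).length : Int) * x)) = o
    cases o <;> simp
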